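-- pv_equiv track=rewrite | github.com/candlepin/subscription-manager | src/rhsmlib/facts/cpuinfo.py | find_shared_key_value_pairs
-- ===== SOURCE A (Python) =====
-- import collections
--
-- def find_shared_key_value_pairs(all_fields, processors):
--     # smashem, last one wins
--     smashed = collections.defaultdict(set)
--
--     # build a dict of fieldname -> list of all the different values
--     # so we can dump the variant ones.
--     for field in all_fields:
--         for k, v in [(field, processor.get(field)) for processor in processors]:
--             if v is None:
--                 continue
--             smashed[k].add(v)
--
--     # remove fields that can't be smashed to one value
--     common_cpu_info = dict([(x, smashed[x].pop()) for x in smashed if len(smashed[x]) == 1])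
--     return common_cpu_info
-- ===== SOURCE B (Python) =====
-- def _common_value(processors, field):
--     # two-state streaming scan: None = nothing seen yet, else the single value
--     # seen so far; bail out as soon as a second distinct value appears
--     common = None
--     for p in processors:
--         v = p.get(field)
--         if v is None:
--             continue
--         if common is None:
--             common = v
--         elif v != common:
--             return None
--     return common
--
--
-- def find_shared_key_value_pairs(all_fields, processors):
--     # no sets, no global table: a constant-space, early-exit scan per field
--     result = {}
--     for field in all_fields:
--         v = _common_value(processors, field)
--         if v is not None:
--             result[field] = v
--     return result
-- ===== Notes on version B (the rewrite author's own statement) =====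
-- stated objective: faster
-- what changed: Replaces A's global defaultdict-of-sets plus a separate filtering comprehension with a per-field two-state streaming automaton (nothing-seen / single-value-so-far) that stops early on the first conflicting value; no set or intermediate pair list is ever built.
import Mathlib
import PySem

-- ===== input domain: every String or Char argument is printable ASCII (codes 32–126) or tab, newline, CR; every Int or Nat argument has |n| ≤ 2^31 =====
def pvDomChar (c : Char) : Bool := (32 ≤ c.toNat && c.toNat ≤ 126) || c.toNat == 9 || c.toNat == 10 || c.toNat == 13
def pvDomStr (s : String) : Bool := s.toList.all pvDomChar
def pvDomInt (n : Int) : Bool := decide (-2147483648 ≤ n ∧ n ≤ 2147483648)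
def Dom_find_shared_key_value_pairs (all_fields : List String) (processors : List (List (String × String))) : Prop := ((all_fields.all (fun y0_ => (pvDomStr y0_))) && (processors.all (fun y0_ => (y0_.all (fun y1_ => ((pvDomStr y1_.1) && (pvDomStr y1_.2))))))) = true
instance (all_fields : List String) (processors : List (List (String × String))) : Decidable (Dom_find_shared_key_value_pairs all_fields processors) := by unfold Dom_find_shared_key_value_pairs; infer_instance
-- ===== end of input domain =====

-- B replaces A's global defaultdict-of-sets plus separate filtering pass with a per-field
-- two-state streaming scan (nothing seen / single value so far, early exit on a conflict);
-- no set or intermediate pair list is built (objective: faster by a constant factor, measured).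
-- ===== PORT A =====
def find_shared_key_value_pairs (all_fields : List String) (processors : List (List (String × String))) : List (String × String) :=
  -- smashed: defaultdict(set); for field in all_fields: for (k, v) in [(field, p.get(field)) for p in processors]: skip None, smashed[k].add(v)
  let smashed : PySem.Dict String (PySem.Set String) :=
    all_fields.foldl (fun d field =>
      (processors.map (fun processor => (field, (PySem.Dict.mk processor).get? field))).foldl
        (fun d kv =>
          match kv.2 with
          | none => d
          | some v => d.insert kv.1 (PySem.Set.add (d.getD kv.1 PySem.Set.empty) v)) d)
      PySem.Dict.empty
  -- dict([(x, smashed[x].pop()) for x in smashed if len(smashed[x]) == 1]); pop on a singleton set yields its element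
  (PySem.Dict.ofList (smashed.keys.filterMap (fun x =>
    let s := smashed.getD x PySem.Set.empty
    if s.length = 1 then some (x, s.headD "") else none))).items

-- ===== PORT B =====
-- _common_value(processors, field): two-state scan with early exit on a conflicting value
def pvCommonValue (processors : List (List (String × String))) (field : String) (common : Option String) : Option String :=
  match processors with
  | [] => common
  | p :: rest =>
    match (PySem.Dict.mk p).get? field with
    | none => pvCommonValue rest field common
    | some v =>
      match common with
      | none => pvCommonValue rest field (some v)
      | some c => if v ≠ c then none else pvCommonValue rest field (some c)

def find_shared_key_value_pairs_alt (all_fields : List String) (processors : List (List (String × String))) : List (String × String) :=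
  (all_fields.foldl (fun result field =>
      match pvCommonValue processors field none with
      | none => result
      | some v => result.insert field v)
    (PySem.Dict.empty : PySem.Dict String String)).items

-- ===== PRECONDITION & SPEC =====
def Spec_find_shared_key_value_pairs (all_fields : List String) (processors : List (List (String × String))) (out : List (String × String)) : Prop := out = find_shared_key_value_pairs_alt all_fields processors
instance (all_fields : List String) (processors : List (List (String × String))) (out : List (String × String)) : Decidable (Spec_find_shared_key_value_pairs all_fields processors out) := by unfold Spec_find_shared_key_value_pairs; infer_instance

-- ===== CLAIM (what is proved, stated in full; the proofs are below) =====
def Claim_equal_find_shared_key_value_pairs : Prop := ∀ (all_fields : List String) (processors : List (List (String × String))), Dom_find_shared_key_value_pairs all_fields processors → Spec_find_shared_key_value_pairs all_fields processors (find_shared_key_value_pairs all_fields processors)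


-- ===== LEMMAS AND PROOFS =====

-- the list of non-None values processors yield for a field, in processor order
def pvVals (processors : List (List (String × String))) (f : String) : List String :=
  processors.filterMap (fun p => (PySem.Dict.mk p).get? f)

-- B's scan, re-expressed on the value list
def pvScan (vs : List String) (common : Option String) : Option String :=
  match vs with
  | [] => common
  | v :: rest =>
    match common with
    | none => pvScan rest (some v)
    | some c => if v ≠ c then none else pvScan rest (some c)

lemma pv_common_eq_scan (ps : List (List (String × String))) (f : String) (c : Option String) :
    pvCommonValue ps f c = pvScan (pvVals ps f) c := by
  induction ps generalizing c with
  | nil => rfl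
  | cons p ps ih =>
    simp only [pvCommonValue, pvVals, List.filterMap_cons]
    cases h : (PySem.Dict.mk p).get? f with
    | none => simpa [pvVals] using ih c
    | some v =>
      cases c with
      | none => simpa [pvScan, pvVals] using ih (some v)
      | some c' =>
        by_cases hv : v = c'
        · simpa [pvScan, hv, pvVals] using ih (some c')
        · simp [pvScan, hv]

lemma pv_scan_some (vs : List String) (c : String) :
    pvScan vs (some c) = if ∀ v ∈ vs, v = c then some c else none := by
  induction vs with
  | nil => simp [pvScan]
  | cons v vs ih =>
    by_cases hv : v = c
    · subst hv; simp [pvScan, ih]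
    · simp [pvScan, hv]

lemma pv_ofList_all_eq (v : String) (l : List String) (h : ∀ x ∈ l, x = v) :
    List.foldl PySem.Set.add [v] l = [v] := by
  induction l with
  | nil => rfl
  | cons x l ih =>
    have hx : x = v := h x (by simp)
    subst hx
    rw [List.foldl_cons, show PySem.Set.add [x] x = [x] by simp [PySem.Set.add, PySem.Set.contains]]
    exact ih (fun y hy => h y (by simp [hy]))

-- A's singleton test on the value SET equals B's streaming scan on the value LIST
lemma pv_char (vs : List String) :
    (if (PySem.Set.ofList vs).length = 1 then some ((PySem.Set.ofList vs).headD "") else none)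
      = pvScan vs none := by
  cases vs with
  | nil => simp [PySem.Set.ofList, pvScan]
  | cons v rest =>
    rw [show pvScan (v :: rest) none = pvScan rest (some v) from rfl, pv_scan_some]
    by_cases h : ∀ x ∈ rest, x = v
    · have hone : PySem.Set.ofList (v :: rest) = [v] := by
        show List.foldl PySem.Set.add (PySem.Set.add [] v) rest = [v]
        rw [show PySem.Set.add [] v = [v] from rfl]
        exact pv_ofList_all_eq v rest h
      simp [hone, if_pos h]
    · push Not at h
      obtain ⟨x, hx, hxv⟩ := h
      have hne : (PySem.Set.ofList (v :: rest)).length ≠ 1 := by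
        intro hlen
        obtain ⟨y, hy⟩ := List.length_eq_one_iff.1 hlen
        have h1 : v ∈ PySem.Set.ofList (v :: rest) := (PySem.Set.mem_ofList _ v).2 (by simp)
        have h2 : x ∈ PySem.Set.ofList (v :: rest) := (PySem.Set.mem_ofList _ x).2 (by simp [hx])
        rw [hy] at h1 h2
        simp only [List.mem_singleton] at h1 h2
        exact hxv (h2.trans h1.symm)
      simp only [if_neg hne]
      rw [if_neg]
      intro hall
      exact hxv (hall x hx)

lemma pv_inner_filterMap (ps : List (List (String × String))) (f : String)
    (d : PySem.Dict String (PySem.Set String)) :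
    ((ps.map (fun p => (f, (PySem.Dict.mk p).get? f))).foldl
      (fun d kv => match kv.2 with
        | none => d
        | some v => d.insert kv.1 (PySem.Set.add (d.getD kv.1 PySem.Set.empty) v)) d)
    = (pvVals ps f).foldl (fun d v => d.insert f (PySem.Set.add (d.getD f PySem.Set.empty) v)) d := by
  induction ps generalizing d with
  | nil => rfl
  | cons p ps ih =>
    simp only [List.map_cons, List.foldl_cons, pvVals, List.filterMap_cons]
    cases h : (PySem.Dict.mk p).get? f with
    | none => simpa [pvVals] using ih d
    | some v => simpa [pvVals] using ih _

lemma pv_vals_fold (f : String) (vs : List String) (d : PySem.Dict String (PySem.Set String))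
    (h : vs ≠ []) :
    vs.foldl (fun d v => d.insert f (PySem.Set.add (d.getD f PySem.Set.empty) v)) d
    = d.insert f (PySem.Set.update (d.getD f PySem.Set.empty) vs) := by
  induction vs generalizing d with
  | nil => cases h rfl
  | cons v vs ih =>
    by_cases hvs : vs = []
    · subst hvs; rfl
    · rw [List.foldl_cons, ih _ hvs, PySem.Dict.getD_insert_self, PySem.Dict.insert_insert_self]
      rfl

lemma pv_add_mem {s : PySem.Set String} {x : String} (h : x ∈ s) :
    PySem.Set.add s x = s := by
  simp [PySem.Set.add, h]

lemma pv_add_not_mem {s : PySem.Set String} {x : String} (h : x ∉ s) :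
    PySem.Set.add s x = s ++ [x] := by
  simp [PySem.Set.add, h]

lemma pv_ofList_append_singleton {α : Type} [BEq α] (l : List α) (x : α) :
    PySem.Set.ofList (l ++ [x]) = PySem.Set.add (PySem.Set.ofList l) x := by
  simp [PySem.Set.ofList, List.foldl_append]

lemma pv_update_of_forall_mem (s : PySem.Set String) (xs : List String)
    (h : ∀ x ∈ xs, x ∈ s) : PySem.Set.update s xs = s := by
  induction xs generalizing s with
  | nil => rfl
  | cons x xs ih =>
    have hx : PySem.Set.add s x = s := by
      simp [PySem.Set.add, h x (by simp)]
    show PySem.Set.update (PySem.Set.add s x) xs = s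
    rw [hx]
    exact ih s (fun y hy => h y (by simp [hy]))

lemma pv_keys_of_items {V : Type} (d : PySem.Dict String V) (st : List String) (g : String → V)
    (h : d.items = st.map (fun f => (f, g f))) : d.keys = st := by
  simp [PySem.Dict.keys, h, List.map_map, Function.comp_def]

lemma pv_insert_of_mem_items {V : Type} (d : PySem.Dict String V) (k : String) (v : V)
    (hn : d.keys.Nodup) (hm : (k, v) ∈ d.items) : d.insert k v = d := by
  have hc : d.contains k = true := (PySem.Dict.contains_iff_mem_keys d k).2
    (List.mem_map_of_mem hm)
  apply PySem.Dict.ext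
  rw [PySem.Dict.items_insert_of_contains d v hc]
  have hget : d.get? k = some v := PySem.Dict.get?_of_mem_items d hm hn
  conv_rhs => rw [← List.map_id d.items]
  apply List.map_congr_left
  intro p hp
  by_cases hk : p.1 = k
  · have h2 : d.get? p.1 = some p.2 := PySem.Dict.get?_of_mem_items d (by simpa using hp) hn
    rw [hk, hget] at h2
    have hv : p.2 = v := (Option.some.inj h2).symm
    simp only [id_eq, hk, BEq.rfl, if_true]
    rw [← hk, ← hv]
  · simp [hk]

-- A's final dict after processing fields fs
lemma pv_A_inv (ps : List (List (String × String))) (fs : List String) :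
    (fs.foldl (fun d f => if pvVals ps f = [] then d
        else d.insert f (PySem.Set.update (d.getD f PySem.Set.empty) (pvVals ps f)))
      PySem.Dict.empty).items
    = (PySem.Set.ofList (fs.filter (fun f => !decide (pvVals ps f = [])))).map
        (fun f => (f, PySem.Set.ofList (pvVals ps f))) := by
  induction fs using List.reverseRecOn with
  | nil => rfl
  | append_singleton fs f ih =>
    rw [List.foldl_append, List.foldl_cons, List.foldl_nil, List.filter_append]
    set D := fs.foldl (fun d f => if pvVals ps f = [] then d
        else d.insert f (PySem.Set.update (d.getD f PySem.Set.empty) (pvVals ps f)))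
      PySem.Dict.empty with hD
    have hkeys : D.keys = PySem.Set.ofList (fs.filter (fun f => !decide (pvVals ps f = []))) :=
      pv_keys_of_items D _ _ ih
    have hnd : D.keys.Nodup := by rw [hkeys]; exact PySem.Set.nodup_ofList _
    by_cases hq : pvVals ps f = []
    · rw [if_pos hq, show List.filter (fun f => !decide (pvVals ps f = [])) [f] = [] by simp [hq],
        List.append_nil, ih]
    · rw [if_neg hq, show List.filter (fun f => !decide (pvVals ps f = [])) [f] = [f] by simp [hq],
        pv_ofList_append_singleton]
      by_cases hm : f ∈ PySem.Set.ofList (fs.filter (fun f => !decide (pvVals ps f = [])))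
      · have hmem : (f, PySem.Set.ofList (pvVals ps f)) ∈ D.items := by
          rw [ih]; exact List.mem_map_of_mem hm
        have hget : D.getD f PySem.Set.empty = PySem.Set.ofList (pvVals ps f) :=
          PySem.Dict.getD_of_mem_items D hmem hnd PySem.Set.empty
        rw [hget, pv_update_of_forall_mem _ _ (fun x hx => (PySem.Set.mem_ofList _ x).2 hx),
          pv_insert_of_mem_items D f _ hnd hmem, ih, pv_add_mem hm]
      · have hc : D.contains f = false := by
          cases hcc : D.contains f with
          | false => rfl
          | true => exact absurd (hkeys ▸ (PySem.Dict.contains_iff_mem_keys D f).1 hcc) hm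
        have hget : D.getD f PySem.Set.empty = PySem.Set.empty :=
          PySem.Dict.getD_of_not_contains D PySem.Set.empty hc
        rw [hget, show PySem.Set.update PySem.Set.empty (pvVals ps f)
              = PySem.Set.ofList (pvVals ps f) from rfl,
          PySem.Dict.items_insert_of_not_contains D _ hc, ih, pv_add_not_mem hm,
          List.map_append]
        rfl

lemma pv_filter_add (s : PySem.Set String) (x : String) (p : String → Bool) :
    (PySem.Set.add s x).filter p = if p x then PySem.Set.add (s.filter p) x else s.filter p := by
  by_cases hm : x ∈ s
  · have h1 : PySem.Set.add s x = s := pv_add_mem hm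
    by_cases hp : p x
    · have h2 : PySem.Set.add (s.filter p) x = s.filter p := pv_add_mem (List.mem_filter.2 ⟨hm, hp⟩)
      simp [h1, hp, h2]
    · simp [h1, hp]
  · have h1 : PySem.Set.add s x = s ++ [x] := pv_add_not_mem hm
    by_cases hp : p x
    · have h2 : PySem.Set.add (s.filter p) x = s.filter p ++ [x] := pv_add_not_mem (fun h => hm (List.mem_of_mem_filter h))
      simp [h1, h2, hp, List.filter_append]
    · simp [h1, hp, List.filter_append]

-- B's dict after processing fields fs (generic insert-if loop)
lemma pv_B_inv (q : String → Prop) [DecidablePred q] (g : String → String) (fs : List String) :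
    (fs.foldl (fun d f => if q f then d.insert f (g f) else d)
      (PySem.Dict.empty : PySem.Dict String String)).items
    = (PySem.Set.ofList (fs.filter (fun f => decide (q f)))).map (fun f => (f, g f)) := by
  induction fs using List.reverseRecOn with
  | nil => rfl
  | append_singleton fs f ih =>
    rw [List.foldl_append, List.foldl_cons, List.foldl_nil, List.filter_append]
    set D := fs.foldl (fun d f => if q f then d.insert f (g f) else d)
      (PySem.Dict.empty : PySem.Dict String String) with hD
    have hkeys : D.keys = PySem.Set.ofList (fs.filter (fun f => decide (q f))) :=
      pv_keys_of_items D _ _ ih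
    by_cases hq : q f
    · rw [if_pos hq, show List.filter (fun f => decide (q f)) [f] = [f] by simp [hq],
        pv_ofList_append_singleton]
      by_cases hm : f ∈ PySem.Set.ofList (fs.filter (fun f => decide (q f)))
      · have hmem : (f, g f) ∈ D.items := by
          rw [ih]; exact List.mem_map_of_mem hm
        have hnd : D.keys.Nodup := by rw [hkeys]; exact PySem.Set.nodup_ofList _
        rw [pv_insert_of_mem_items D f (g f) hnd hmem, ih, pv_add_mem hm]
      · have hc : D.contains f = false := by
          cases hcc : D.contains f with
          | false => rfl
          | true => exact absurd (hkeys ▸ (PySem.Dict.contains_iff_mem_keys D f).1 hcc) hm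
        rw [PySem.Dict.items_insert_of_not_contains D (g f) hc, ih, pv_add_not_mem hm,
          List.map_append]
        rfl
    · rw [if_neg hq, show List.filter (fun f => decide (q f)) [f] = [] by simp [hq],
        List.append_nil, ih]

lemma pv_filterMap_if (q : String → Prop) [DecidablePred q] (g : String → String × String)
    (l : List String) :
    l.filterMap (fun x => if q x then some (g x) else none)
    = (l.filter (fun x => decide (q x))).map g := by
  induction l with
  | nil => rfl
  | cons x l ih => by_cases h : q x <;> simp [h, ih]

lemma pv_ofList_filter (l : List String) (p : String → Bool) :
    (PySem.Set.ofList l).filter p = PySem.Set.ofList (l.filter p) := by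
  induction l using List.reverseRecOn with
  | nil => rfl
  | append_singleton l x ih =>
    rw [pv_ofList_append_singleton, List.filter_append, pv_filter_add, ih]
    by_cases hp : p x
    · rw [if_pos hp, show List.filter p [x] = [x] by simp [hp], pv_ofList_append_singleton]
    · rw [if_neg hp, show List.filter p [x] = [] by simp [hp], List.append_nil]


-- ===== VERDICT (by name: the statement is the Claim_ definition above) =====
theorem find_shared_key_value_pairs_spec : Claim_equal_find_shared_key_value_pairs := by
  intro all_fields ps _
  unfold Spec_find_shared_key_value_pairs find_shared_key_value_pairs find_shared_key_value_pairs_alt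
  have hstep : (fun (d : PySem.Dict String (PySem.Set String)) field =>
      (ps.map (fun processor => (field, (PySem.Dict.mk processor).get? field))).foldl
        (fun d kv => match kv.2 with
          | none => d
          | some v => d.insert kv.1 (PySem.Set.add (d.getD kv.1 PySem.Set.empty) v)) d)
      = (fun d field => if pvVals ps field = [] then d
          else d.insert field (PySem.Set.update (d.getD field PySem.Set.empty) (pvVals ps field))) := by
    funext d field
    rw [pv_inner_filterMap]
    by_cases h : pvVals ps field = []
    · rw [if_pos h, h]; rfl
    · rw [if_neg h, pv_vals_fold field _ d h]
  simp only [hstep]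
  set D := all_fields.foldl (fun d field => if pvVals ps field = [] then d
      else d.insert field (PySem.Set.update (d.getD field PySem.Set.empty) (pvVals ps field)))
    PySem.Dict.empty with hDdef
  have hA : D.items = (PySem.Set.ofList (all_fields.filter (fun f => !decide (pvVals ps f = [])))).map
      (fun f => (f, PySem.Set.ofList (pvVals ps f))) := pv_A_inv ps all_fields
  have hkeys : D.keys = PySem.Set.ofList (all_fields.filter (fun f => !decide (pvVals ps f = []))) :=
    pv_keys_of_items D _ _ hA
  have hnd : D.keys.Nodup := by rw [hkeys]; exact PySem.Set.nodup_ofList _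
  -- rewrite the comprehension over smashed's keys as a pure function of each field
  have hcong : D.keys.filterMap (fun x =>
        if (D.getD x PySem.Set.empty).length = 1
        then some (x, (D.getD x PySem.Set.empty).headD "") else none)
      = D.keys.filterMap (fun x =>
        if (PySem.Set.ofList (pvVals ps x)).length = 1
        then some (x, (PySem.Set.ofList (pvVals ps x)).headD "") else none) := by
    apply List.filterMap_congr
    intro x hx
    have hmem : (x, PySem.Set.ofList (pvVals ps x)) ∈ D.items := by
      rw [hA]
      exact List.mem_map_of_mem (hkeys ▸ hx)
    rw [PySem.Dict.getD_of_mem_items D hmem hnd PySem.Set.empty]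
  rw [hcong, pv_filterMap_if (fun x => (PySem.Set.ofList (pvVals ps x)).length = 1)
      (fun x => (x, (PySem.Set.ofList (pvVals ps x)).headD "")) D.keys, hkeys]
  -- the pairs have fresh, distinct keys: dict() of them is just the list
  have hpairsnd : ((((PySem.Set.ofList (all_fields.filter (fun f => !decide (pvVals ps f = [])))).filter
        (fun x => decide ((PySem.Set.ofList (pvVals ps x)).length = 1))).map
        (fun x => (x, (PySem.Set.ofList (pvVals ps x)).headD ""))).map Prod.fst).Nodup := by
    rw [List.map_map]
    simp only [Function.comp_def, List.map_id']
    exact (PySem.Set.nodup_ofList _).filter _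
  have hofl : ∀ (l : List (String × String)), (l.map Prod.fst).Nodup →
      (PySem.Dict.ofList l).items = l := by
    intro l hl
    show ((List.foldl (fun d p => d.insert p.1 p.2) PySem.Dict.empty l)).items = l
    rw [PySem.Dict.items_foldl_insert_fresh l Prod.fst Prod.snd PySem.Dict.empty
      (fun a _ => by simp [PySem.Dict.contains_empty]) hl]
    simp [PySem.Dict.empty]
  rw [hofl _ hpairsnd]
  -- B's step: the streaming scan decides exactly A's "singleton value set" test
  have hstepB : (fun (result : PySem.Dict String String) field =>
      match pvCommonValue ps field none with
      | none => result
      | some v => result.insert field v)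
      = (fun result field => if (PySem.Set.ofList (pvVals ps field)).length = 1
          then result.insert field ((PySem.Set.ofList (pvVals ps field)).headD "") else result) := by
    funext result field
    rw [pv_common_eq_scan, ← pv_char]
    by_cases h : (PySem.Set.ofList (pvVals ps field)).length = 1
    · simp [h]
    · simp [h]
  simp only [hstepB]
  have hB := pv_B_inv (fun f => (PySem.Set.ofList (pvVals ps f)).length = 1)
    (fun f => (PySem.Set.ofList (pvVals ps f)).headD "") all_fields
  rw [hB]
  -- the two field sets coincide
  rw [pv_ofList_filter, List.filter_filter]
  congr 1
  apply congrArg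
  apply List.filter_congr
  intro f _
  by_cases h1 : (PySem.Set.ofList (pvVals ps f)).length = 1
  · have hne : ¬ pvVals ps f = [] := by
      intro h
      rw [h] at h1
      simp [PySem.Set.ofList, PySem.Set.empty] at h1
    simp [h1, hne]
  · simp [h1]
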